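-- pv_equiv track=rewrite | github.com/aledlie/ast-grep-mcp | src/ast_grep_mcp/features/condense/service.py | _count_structural_braces
-- ===== SOURCE A (Python) =====
-- def _count_structural_braces(line: str) -> int:
--     """Count net structural braces on a line, skipping strings and comments.
--
--     Handles single-quoted, double-quoted, and template-literal strings.
--     Stops counting at // line comments. Does not handle multi-line strings.
--     Returns opens minus closes for structural braces only.
--     """
--     net = 0
--     i = 0
--     n = len(line)
--     while i < n:
--         c = line[i]
--         # Line comment: stop
--         if c == "/" and i + 1 < n and line[i + 1] == "/":
--             break
--         # String / template literal: skip to matching close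
--         if c in ('"', "'", "`"):
--             quote = c
--             i += 1
--             while i < n:
--                 ch = line[i]
--                 if ch == "\\" and i + 1 < n:
--                     i += 2
--                     continue
--                 if ch == quote:
--                     break
--                 i += 1
--         elif c == "{":
--             net += 1
--         elif c == "}":
--             net -= 1
--         i += 1
--     return net
-- ===== SOURCE B (Python) =====
-- def _count_structural_braces(line: str) -> int:
--     """Single flat state-machine pass that collects the structural (non-string,
--     non-comment) characters, then counts braces on that filtered text."""
--     structural = []
--     quote = None
--     escaped = False
--     for i, c in enumerate(line):
--         if quote is not None:
--             if escaped:
--                 escaped = False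
--             elif c == "\\":
--                 escaped = True
--             elif c == quote:
--                 quote = None
--         elif c == "/" and line[i + 1 : i + 2] == "/":
--             break
--         elif c in "\"'`":
--             quote = c
--         else:
--             structural.append(c)
--     return structural.count("{") - structural.count("}")
-- ===== Notes on version B (the rewrite author's own statement) =====
-- stated objective: alternative
-- what changed: Replaced A's nested index-based while loops with a mutating net accumulator by a single flat state-machine pass (quote/escaped flags) that collects the structural characters and then takes the difference of the counts of the two brace characters on the filtered text.
import Mathlib
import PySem

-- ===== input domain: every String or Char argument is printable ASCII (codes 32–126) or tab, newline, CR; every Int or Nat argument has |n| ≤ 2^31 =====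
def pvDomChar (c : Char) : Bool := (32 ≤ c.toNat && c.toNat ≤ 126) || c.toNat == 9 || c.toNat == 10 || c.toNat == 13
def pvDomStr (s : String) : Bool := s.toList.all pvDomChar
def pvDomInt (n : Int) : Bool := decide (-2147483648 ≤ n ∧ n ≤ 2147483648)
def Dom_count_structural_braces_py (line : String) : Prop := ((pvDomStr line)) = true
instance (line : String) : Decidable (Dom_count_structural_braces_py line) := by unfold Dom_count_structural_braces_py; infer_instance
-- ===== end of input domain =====

-- B is an alternative decomposition: one flat state-machine pass collecting structural
-- characters, then counting braces on the filtered text (same O(n) cost as A).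

-- ===== PORT A =====
-- inner while loop of A: skip a string literal opened with `quote`, returning the final i
def pvAInner (s : List Char) (n : Nat) (quote : Char) (i : Nat) : Nat :=
  if i < n then
    if s.getD i ' ' = '\\' ∧ i + 1 < n then pvAInner s n quote (i + 2)
    else if s.getD i ' ' = quote then i
    else pvAInner s n quote (i + 1)
  else i
termination_by n - i

theorem pvAInner_ge (s : List Char) (n : Nat) (quote : Char) (i : Nat) :
    i ≤ pvAInner s n quote i := by
  unfold pvAInner
  split
  · split
    · have := pvAInner_ge s n quote (i + 2); omega
    · split
      · omega
      · have := pvAInner_ge s n quote (i + 1); omega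
  · omega
termination_by n - i

-- outer while loop of A
def pvAOuter (s : List Char) (n : Nat) (i : Nat) (net : Int) : Int :=
  if _h : i < n then
    if s.getD i ' ' = '/' ∧ i + 1 < n ∧ s.getD (i + 1) ' ' = '/' then net
    else if s.getD i ' ' = '"' ∨ s.getD i ' ' = '\'' ∨ s.getD i ' ' = '`' then
      pvAOuter s n (pvAInner s n (s.getD i ' ') (i + 1) + 1) net
    else if s.getD i ' ' = '{' then pvAOuter s n (i + 1) (net + 1)
    else if s.getD i ' ' = '}' then pvAOuter s n (i + 1) (net - 1)
    else pvAOuter s n (i + 1) net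
  else net
termination_by n - i
decreasing_by
  · have := pvAInner_ge s n (s.getD i ' ') (i + 1); omega
  · omega
  · omega
  · omega

def count_structural_braces_py (line : String) : Int :=
  pvAOuter line.toList line.toList.length 0 0

-- ===== PORT B =====
-- flat state machine of Source B: state = (quote : Option Char, escaped : Bool);
-- returns the structural characters kept by the loop (rest.head? plays line[i+1:i+2])
def pvBLoop (quote : Option Char) (escaped : Bool) : List Char → List Char
  | [] => []
  | c :: rest =>
    match quote with
    | some q =>
      if escaped then pvBLoop (some q) false rest
      else if c = '\\' then pvBLoop (some q) true rest
      else if c = q then pvBLoop none false rest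
      else pvBLoop (some q) false rest
    | none =>
      if c = '/' ∧ rest.head? = some '/' then []
      else if c = '"' ∨ c = '\'' ∨ c = '`' then pvBLoop (some c) false rest
      else c :: pvBLoop none false rest

def count_structural_braces_py_alt (line : String) : Int :=
  let structural := pvBLoop none false line.toList
  (structural.count '{' : Int) - (structural.count '}' : Int)

-- ===== PRECONDITION & SPEC =====
def Spec_count_structural_braces_py (line : String) (out : Int) : Prop := out = count_structural_braces_py_alt line
instance (line : String) (out : Int) : Decidable (Spec_count_structural_braces_py line out) := by unfold Spec_count_structural_braces_py; infer_instance

-- ===== CLAIM (what is proved, stated in full; the proofs are below) =====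
def Claim_equal_count_structural_braces_py : Prop := ∀ (line : String), Dom_count_structural_braces_py line → Spec_count_structural_braces_py line (count_structural_braces_py line)

-- ===== LEMMAS AND PROOFS =====
def pvNet (l : List Char) : Int := (l.count '{' : Int) - (l.count '}' : Int)

theorem pvDropCons (s : List Char) (i : Nat) (h : i < s.length) :
    s.drop i = s.getD i ' ' :: s.drop (i + 1) := by
  rw [List.drop_eq_getElem_cons h, List.getD_eq_getElem s ' ' h]

-- one-step unfolding lemmas for B's state machine (definitional)
theorem pvBLoop_cons_some (q : Char) (e : Bool) (c : Char) (rest : List Char) :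
    pvBLoop (some q) e (c :: rest) =
      if e then pvBLoop (some q) false rest
      else if c = '\\' then pvBLoop (some q) true rest
      else if c = q then pvBLoop none false rest
      else pvBLoop (some q) false rest := rfl

theorem pvBLoop_cons_none (c : Char) (rest : List Char) :
    pvBLoop none false (c :: rest) =
      if c = '/' ∧ rest.head? = some '/' then []
      else if c = '"' ∨ c = '\'' ∨ c = '`' then pvBLoop (some c) false rest
      else c :: pvBLoop none false rest := rfl

-- string mode: A's inner loop and B's quote-state agree on where the string ends
theorem pvInner_eq (s : List Char) (q : Char) (i : Nat) :
    pvBLoop (some q) false (s.drop i) =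
      pvBLoop none false (s.drop (pvAInner s s.length q i + 1)) := by
  unfold pvAInner
  split
  · rename_i hi
    rw [pvDropCons s i hi, pvBLoop_cons_some, if_neg (by decide : ¬ ((false : Bool) = true))]
    by_cases hb : s.getD i ' ' = '\\' ∧ i + 1 < s.length
    · rw [if_pos hb, if_pos hb.1, pvDropCons s (i + 1) hb.2, pvBLoop_cons_some,
        if_pos (rfl : (true : Bool) = true)]
      exact pvInner_eq s q (i + 2)
    · rw [if_neg hb]
      by_cases hq : s.getD i ' ' = q
      · have hA : (if s.getD i ' ' = q then i else pvAInner s s.length q (i + 1)) = i :=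
          if_pos hq
        rw [hA]
        by_cases hcc : s.getD i ' ' = '\\'
        · have hnl : ¬ (i + 1 < s.length) := fun h => hb ⟨hcc, h⟩
          have hd : s.drop (i + 1) = ([] : List Char) := by
            apply List.drop_eq_nil_of_le; omega
          rw [if_pos hcc, hd]
          rfl
        · rw [if_neg hcc, if_pos hq]
      · have hA : (if s.getD i ' ' = q then i else pvAInner s s.length q (i + 1)) =
            pvAInner s s.length q (i + 1) := if_neg hq
        rw [hA]
        by_cases hcc : s.getD i ' ' = '\\'
        · have hnl : ¬ (i + 1 < s.length) := fun h => hb ⟨hcc, h⟩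
          have hd : s.drop (i + 1) = ([] : List Char) := by
            apply List.drop_eq_nil_of_le; omega
          have hd2 : s.drop (pvAInner s s.length q (i + 1) + 1) = ([] : List Char) := by
            apply List.drop_eq_nil_of_le
            have := pvAInner_ge s s.length q (i + 1); omega
          rw [if_pos hcc, hd, hd2]
          rfl
        · rw [if_neg hcc, if_neg hq]
          exact pvInner_eq s q (i + 1)
  · rename_i hi
    have h1 : s.drop i = ([] : List Char) := by apply List.drop_eq_nil_of_le; omega
    have h2 : s.drop (i + 1) = ([] : List Char) := by apply List.drop_eq_nil_of_le; omega
    rw [h1, h2]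
    rfl
termination_by s.length - i
decreasing_by all_goals omega

theorem pvOuter_eq (s : List Char) (k i : Nat) (net : Int) (hk : s.length - i ≤ k) :
    pvAOuter s s.length i net = net + pvNet (pvBLoop none false (s.drop i)) := by
  induction k generalizing i net with
  | zero =>
    have hi : ¬ (i < s.length) := by omega
    have hd : s.drop i = ([] : List Char) := by apply List.drop_eq_nil_of_le; omega
    unfold pvAOuter
    rw [dif_neg hi, hd]
    simp [pvBLoop, pvNet]
  | succ k ih =>
    by_cases hi : i < s.length
    · unfold pvAOuter
      rw [dif_pos hi, pvDropCons s i hi, pvBLoop_cons_none]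
      by_cases hcm : s.getD i ' ' = '/' ∧ i + 1 < s.length ∧ s.getD (i + 1) ' ' = '/'
      · -- comment: both stop here
        have hh : (s.drop (i + 1)).head? = some '/' := by
          rw [pvDropCons s (i + 1) hcm.2.1, List.head?_cons]
          exact congrArg some hcm.2.2
        rw [if_pos hcm, if_pos ⟨hcm.1, hh⟩]
        simp [pvNet]
      · rw [if_neg hcm]
        have hnc : ¬ (s.getD i ' ' = '/' ∧ (s.drop (i + 1)).head? = some '/') := by
          rintro ⟨h1, h2⟩
          by_cases hl : i + 1 < s.length
          · rw [pvDropCons s (i + 1) hl, List.head?_cons] at h2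
            exact hcm ⟨h1, hl, Option.some.inj h2⟩
          · rw [List.drop_eq_nil_of_le (by omega)] at h2; simp at h2
        rw [if_neg hnc]
        by_cases hqc : s.getD i ' ' = '"' ∨ s.getD i ' ' = '\'' ∨ s.getD i ' ' = '`'
        · -- string literal: A skips with the inner loop, B switches to quote state
          rw [if_pos hqc, if_pos hqc, pvInner_eq s (s.getD i ' ') (i + 1)]
          have hge := pvAInner_ge s s.length (s.getD i ' ') (i + 1)
          exact ih (pvAInner s s.length (s.getD i ' ') (i + 1) + 1) net (by omega)
        · rw [if_neg hqc, if_neg hqc]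
          have hrec : ∀ m : Int, pvAOuter s s.length (i + 1) m =
              m + pvNet (pvBLoop none false (s.drop (i + 1))) :=
            fun m => ih (i + 1) m (by omega)
          by_cases h1 : s.getD i ' ' = '{'
          · rw [if_pos h1, hrec, h1]
            simp [pvNet]
            omega
          · rw [if_neg h1]
            by_cases h2 : s.getD i ' ' = '}'
            · rw [if_pos h2, hrec, h2]
              simp [pvNet]
              omega
            · rw [if_neg h2, hrec]
              simp only [pvNet]
              rw [List.count_cons_of_ne h1, List.count_cons_of_ne h2]
    · have hd : s.drop i = ([] : List Char) := by apply List.drop_eq_nil_of_le; omega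
      unfold pvAOuter
      rw [dif_neg hi, hd]
      simp [pvBLoop, pvNet]

-- ===== VERDICT (by name: the statement is the Claim_ definition above) =====
theorem count_structural_braces_py_spec : Claim_equal_count_structural_braces_py := by
  intro line _
  unfold Spec_count_structural_braces_py count_structural_braces_py count_structural_braces_py_alt
  rw [pvOuter_eq line.toList line.toList.length 0 0 (by omega)]
  simp [pvNet]
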